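-- pv_equiv track=rewrite | github.com/1r0nw1ll/quantum-arithmetic-research | qa_finance_joint_transition.py | qa_neighborhood
-- ===== SOURCE A (Python) =====
-- def qa_step(b, e, m):
--     return e, (b + e) % m
--
-- def qa_neighborhood(b, e, m, radius):
--     """All states reachable within `radius` Q-steps from (b,e)."""
--     frontier = {(b, e)}
--     visited  = {(b, e)}
--     for _ in range(radius):
--         nxt = set()
--         for sb, se in frontier:
--             nb, ne = qa_step(sb, se, m)
--             if (nb, ne) not in visited:
--                 visited.add((nb, ne)); nxt.add((nb, ne))
--         frontier = nxt
--     return visited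
-- ===== SOURCE B (Python) =====
-- def qa_step(b, e, m):
--     return e, (b + e) % m
--
-- def qa_neighborhood(b, e, m, radius):
--     """All states reachable within `radius` Q-steps from (b,e)."""
--     cur = (b, e)
--     visited = {cur}
--     for _ in range(radius):
--         cur = qa_step(*cur, m)
--         if cur in visited:
--             break
--         visited.add(cur)
--     return visited
-- ===== Notes on version B (the rewrite author's own statement) =====
-- stated objective: simpler
-- what changed: Replaces the BFS frontier-set expansion (outer loop over radius with an inner loop over a frontier set and per-step set construction) by a flat single-pass trajectory walk over one current state with an early break on the first revisited state; Pre_ excludes m = 0 with radius > 0, where A raises ZeroDivisionError.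
import Mathlib
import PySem

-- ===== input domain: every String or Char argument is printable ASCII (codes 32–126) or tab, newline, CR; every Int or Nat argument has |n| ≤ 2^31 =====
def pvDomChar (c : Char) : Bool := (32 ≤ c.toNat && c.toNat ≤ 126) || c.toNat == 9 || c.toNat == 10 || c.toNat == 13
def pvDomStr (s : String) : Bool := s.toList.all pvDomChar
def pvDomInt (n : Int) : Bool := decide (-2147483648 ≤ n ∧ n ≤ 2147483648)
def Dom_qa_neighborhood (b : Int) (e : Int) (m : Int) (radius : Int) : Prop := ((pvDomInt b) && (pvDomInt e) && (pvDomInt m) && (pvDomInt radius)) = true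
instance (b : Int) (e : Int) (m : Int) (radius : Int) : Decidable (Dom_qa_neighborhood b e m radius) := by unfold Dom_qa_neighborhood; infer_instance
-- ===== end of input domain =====

-- B replaces A's BFS frontier-set expansion by a single trajectory walk with an
-- early exit on the first revisit (the step is deterministic); objective: simpler.

-- ===== PORT A =====
def qa_step (b : Int) (e : Int) (m : Int) : Int × Int := (e, PySem.Int.mod (b + e) m)

-- inner 'for sb, se in frontier' body, folded over the frontier; state = (visited, nxt)
def qaInner (m : Int) (p : PySem.Set (Int × Int) × PySem.Set (Int × Int)) (s : Int × Int) :
    PySem.Set (Int × Int) × PySem.Set (Int × Int) :=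
  let n := qa_step s.1 s.2 m
  if PySem.Set.contains p.1 n then p else (PySem.Set.add p.1 n, PySem.Set.add p.2 n)

-- outer 'for _ in range(radius)' loop; carries (frontier, visited)
def qaLoopA (m : Int) : Nat → PySem.Set (Int × Int) → PySem.Set (Int × Int) → PySem.Set (Int × Int)
  | 0, _, visited => visited
  | n + 1, frontier, visited =>
    let p := frontier.foldl (qaInner m) (visited, PySem.Set.empty)
    qaLoopA m n p.2 p.1

def qa_neighborhood (b : Int) (e : Int) (m : Int) (radius : Int) : List (Int × Int) :=
  let start : PySem.Set (Int × Int) := PySem.Set.add PySem.Set.empty (b, e)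
  qaLoopA m radius.toNat start start

-- ===== PORT B =====
-- 'for _ in range(radius): cur = qa_step(*cur, m); if cur in visited: break; visited.add(cur)'
def qaLoopB (m : Int) : Nat → (Int × Int) → PySem.Set (Int × Int) → PySem.Set (Int × Int)
  | 0, _, visited => visited
  | n + 1, cur, visited =>
    let c := qa_step cur.1 cur.2 m
    if PySem.Set.contains visited c then visited
    else qaLoopB m n c (PySem.Set.add visited c)

def qa_neighborhood_alt (b : Int) (e : Int) (m : Int) (radius : Int) : List (Int × Int) :=
  qaLoopB m radius.toNat (b, e) (PySem.Set.add PySem.Set.empty (b, e))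

-- ===== PRECONDITION & SPEC =====
-- Python A raises ZeroDivisionError when m = 0 and at least one step runs; excluded.
def Pre_qa_neighborhood (b : Int) (e : Int) (m : Int) (radius : Int) : Prop := m ≠ 0 ∨ radius ≤ 0
instance (b : Int) (e : Int) (m : Int) (radius : Int) : Decidable (Pre_qa_neighborhood b e m radius) := by unfold Pre_qa_neighborhood; infer_instance
def pvWitness_qa_neighborhood : Int × Int × Int × Int := (1, 2, 5, 3)

def Spec_qa_neighborhood (b : Int) (e : Int) (m : Int) (radius : Int) (out : List (Int × Int)) : Prop := out = qa_neighborhood_alt b e m radius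
instance (b : Int) (e : Int) (m : Int) (radius : Int) (out : List (Int × Int)) : Decidable (Spec_qa_neighborhood b e m radius out) := by unfold Spec_qa_neighborhood; infer_instance

-- ===== CLAIM (what is proved, stated in full; the proofs are below) =====
def Claim_equal_qa_neighborhood : Prop := ∀ (b : Int) (e : Int) (m : Int) (radius : Int), Dom_qa_neighborhood b e m radius → Pre_qa_neighborhood b e m radius → Spec_qa_neighborhood b e m radius (qa_neighborhood b e m radius)

-- ===== LEMMAS AND PROOFS =====

theorem qaLoopA_nil (m : Int) : ∀ n v, qaLoopA m n PySem.Set.empty v = v := by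
  intro n
  induction n with
  | zero => intro v; rfl
  | succ k ih => intro v; simpa [qaLoopA, PySem.Set.empty] using ih v

theorem qaLoopA_singleton (m : Int) :
    ∀ (n : Nat) (c : Int × Int) (v : PySem.Set (Int × Int)),
      qaLoopA m n [c] v = qaLoopB m n c v := by
  intro n
  induction n with
  | zero => intro c v; rfl
  | succ k ih =>
    intro c v
    simp only [qaLoopA, qaLoopB, List.foldl, qaInner]
    by_cases h : qa_step c.1 c.2 m ∈ v
    · simpa [h] using qaLoopA_nil m k v
    · simpa [h, PySem.Set.add] using ih (qa_step c.1 c.2 m) (v ++ [qa_step c.1 c.2 m])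

-- ===== VERDICT (by name: the statement is the Claim_ definition above) =====
theorem qa_neighborhood_spec : Claim_equal_qa_neighborhood := by
  intro b e m radius _ _
  unfold Spec_qa_neighborhood qa_neighborhood qa_neighborhood_alt
  exact qaLoopA_singleton m radius.toNat (b, e) _
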